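-- pv_equiv track=rewrite | github.com/BugTraceAI/BugTraceAI-CLI | bugtrace/tools/waf/encodings.py | _backslash_escape
-- ===== SOURCE A (Python) =====
-- def _backslash_escape(payload: str) -> str:
--     r"""
--     Use backslash escapes.
--     <script> -> <\script>
--     """
--     replacements = [
--         ("script", "\\script"),
--         ("alert", "\\alert"),
--         ("img", "\\img"),
--         ("svg", "\\svg"),
--     ]
--     result = payload
--     for original, replacement in replacements:
--         result = result.replace(original, replacement)
--     return result
-- ===== SOURCE B (Python) =====
-- def _backslash_escape(payload: str) -> str:
--     r"""
--     Use backslash escapes, single left-to-right scan.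
--     <script> -> <\script>
--     """
--     keywords = [
--         ("script", "\\script"),
--         ("alert", "\\alert"),
--         ("img", "\\img"),
--         ("svg", "\\svg"),
--     ]
--     out = []
--     i = 0
--     n = len(payload)
--     while i < n:
--         for kw, esc in keywords:
--             if payload.startswith(kw, i):
--                 out.append(esc)
--                 i += len(kw)
--                 break
--         else:
--             out.append(payload[i])
--             i += 1
--     return "".join(out)
-- ===== Notes on version B (the rewrite author's own statement) =====
-- stated objective: alternative
-- what changed: Replaced A's four sequential str.replace passes (each rewriting the whole intermediate string) by a single left-to-right scan over the payload with a (keyword, escaped) table, emitting either an escaped keyword or one character at each position.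
import Mathlib
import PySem

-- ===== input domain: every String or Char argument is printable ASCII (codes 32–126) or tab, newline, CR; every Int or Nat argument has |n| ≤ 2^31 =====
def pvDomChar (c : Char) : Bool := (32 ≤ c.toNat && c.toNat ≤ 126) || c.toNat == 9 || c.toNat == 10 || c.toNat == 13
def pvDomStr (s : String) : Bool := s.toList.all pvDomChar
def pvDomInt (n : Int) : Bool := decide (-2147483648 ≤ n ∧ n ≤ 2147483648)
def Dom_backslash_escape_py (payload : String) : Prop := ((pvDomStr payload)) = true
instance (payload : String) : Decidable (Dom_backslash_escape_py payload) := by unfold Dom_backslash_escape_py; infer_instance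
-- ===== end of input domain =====

-- B replaces A's four sequential str.replace passes by one left-to-right scan over the
-- characters with a keyword table (objective: alternative single-pass algorithm, same result).

-- ===== PORT A =====
-- Python A: result = payload; for (original, replacement) in replacements: result = result.replace(original, replacement)
def backslash_escape_py (payload : String) : String :=
  let replacements : List (String × String) :=
    [("script", "\\script"), ("alert", "\\alert"), ("img", "\\img"), ("svg", "\\svg")]
  replacements.foldl (fun result p => PySem.Str.replace result p.1 p.2) payload

-- ===== PORT B =====
-- the (keyword, escaped) table of Source B, as char lists
def pvKeywords : List (List Char × List Char) :=
  [("script".toList, "\\script".toList), ("alert".toList, "\\alert".toList),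
   ("img".toList, "\\img".toList), ("svg".toList, "\\svg".toList)]

-- Source B's while loop: at each position take the first keyword that starts here (the for/else),
-- emit its escaped form and jump over it, otherwise emit the single character.
def pvScan (ps : List (List Char × List Char)) : List Char → List Char
  | [] => []
  | c :: t =>
    match ps.find? (fun p => p.1.isPrefixOf (c :: t)) with
    | some (k, r) => r ++ pvScan ps (t.drop (k.length - 1))
    | none => c :: pvScan ps t
termination_by l => l.length
decreasing_by
  · simp only [List.length_cons, List.length_drop]; omega
  · simp only [List.length_cons]; omega

def backslash_escape_py_alt (payload : String) : String :=
  String.ofList (pvScan pvKeywords payload.toList)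

-- ===== PRECONDITION & SPEC =====
def Spec_backslash_escape_py (payload : String) (out : String) : Prop := out = backslash_escape_py_alt payload
instance (payload : String) (out : String) : Decidable (Spec_backslash_escape_py payload out) := by unfold Spec_backslash_escape_py; infer_instance

-- ===== CLAIM (what is proved, stated in full; the proofs are below) =====
def Claim_equal_backslash_escape_py : Prop := ∀ (payload : String), Dom_backslash_escape_py payload → Spec_backslash_escape_py payload (backslash_escape_py payload)

-- ===== LEMMAS AND PROOFS =====

theorem pvTrunc_not_prefix {w xs : List Char} (u : List Char)
    (h : (w.take xs.length).isPrefixOf xs = false) : w.isPrefixOf (xs ++ u) = false := by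
  rw [← Bool.not_eq_true, List.isPrefixOf_iff_prefix] at h ⊢
  intro hp
  apply h
  obtain ⟨v, hv⟩ := hp
  refine ⟨(v.take (xs.length - w.length)), ?_⟩
  have h2 := congrArg (List.take xs.length) hv
  rw [List.take_append, List.take_left] at h2
  exact h2
theorem pvScan_nil (ps) : pvScan ps [] = [] := by simp [pvScan]
theorem pvScan_cons_none (ps) (c : Char) (t) (h : ps.find? (fun p => p.1.isPrefixOf (c :: t)) = none) :
    pvScan ps (c :: t) = c :: pvScan ps t := by rw [pvScan, h]
theorem pvScan_cons_some (ps) (c : Char) (t k r) (h : ps.find? (fun p => p.1.isPrefixOf (c :: t)) = some (k, r)) :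
    pvScan ps (c :: t) = r ++ pvScan ps (t.drop (k.length - 1)) := by rw [pvScan, h]

theorem pvSkip (ps : List (List Char × List Char)) (pre u : List Char)
    (h : ∀ p ∈ ps, ∀ i < pre.length,
      ((p.1.take (pre.length - i)).isPrefixOf (pre.drop i)) = false) :
    pvScan ps (pre ++ u) = pre ++ pvScan ps u := by
  induction pre with
  | nil => simp
  | cons c pr ih =>
    have hnone : ps.find? (fun p => p.1.isPrefixOf (c :: (pr ++ u))) = none := by
      rw [List.find?_eq_none]
      intro p hp
      have h0 := h p hp 0 (by simp)
      simp only [List.drop_zero, Nat.sub_zero] at h0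
      simp only [Bool.not_eq_true]
      exact pvTrunc_not_prefix u h0
    rw [List.cons_append, pvScan_cons_none _ _ _ hnone, ih]
    · simp
    · intro p hp i hi
      have := h p hp (i+1) (by simpa using Nat.succ_lt_succ hi)
      simpa using this



theorem pvHeadBack (ps : List (List Char × List Char))
    (hrep : ∀ p ∈ ps, p.2.head? = some '\\') :
    ∀ (n : Nat) (t w : List Char), t.length ≤ n → '\\' ∉ w →
      w.isPrefixOf (pvScan ps t) = true → w.isPrefixOf t = true := by
  intro n
  induction n with
  | zero =>
    intro t w ht hw hp
    have : t = [] := List.eq_nil_of_length_eq_zero (Nat.le_zero.mp ht)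
    subst this; rwa [pvScan_nil] at hp
  | succ n ih =>
    intro t w ht hw hp
    match t with
    | [] => rwa [pvScan_nil] at hp
    | c :: t' =>
      cases hfind : List.find? (fun p => p.1.isPrefixOf (c :: t')) ps with
      | some pr =>
        obtain ⟨k, r⟩ := pr
        rw [pvScan_cons_some _ _ _ _ _ hfind] at hp
        have hh := hrep _ (List.mem_of_find?_eq_some hfind)
        match w with
        | [] => simp
        | w0 :: w' =>
          exfalso
          match r, hh with
          | r0 :: r'', hh =>
            have hr0 : r0 = '\\' := by simpa using hh
            rw [List.isPrefixOf_iff_prefix, List.cons_append, List.cons_prefix_cons] at hp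
            exact hw (by rw [hp.1, hr0]; exact List.mem_cons_self ..)
      | none =>
        rw [pvScan_cons_none _ _ _ hfind] at hp
        match w with
        | [] => simp
        | w0 :: w' =>
          rw [List.isPrefixOf_iff_prefix, List.cons_prefix_cons] at hp ⊢
          obtain ⟨rfl, hp'⟩ := hp
          refine ⟨rfl, ?_⟩
          rw [← List.isPrefixOf_iff_prefix] at hp' ⊢
          exact ih t' w' (by simpa using Nat.lt_succ_iff.mp (by simpa using ht))
            (fun hm => hw (List.mem_cons_of_mem _ hm)) hp'

theorem pvStage (ps : List (List Char × List Char)) (a b : List Char)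
    (ha : a ≠ []) (haw : '\\' ∉ a)
    (hrep : ∀ p ∈ ps, p.2.head? = some '\\')
    (hskip : ∀ p ∈ ps, ∀ i < p.2.length,
      ((a.take (p.2.length - i)).isPrefixOf (p.2.drop i)) = false)
    (hker : ∀ p ∈ ps, ∀ i < a.length,
      ((p.1.take (a.length - i)).isPrefixOf (a.drop i)) = false) :
    ∀ (n : Nat) (s : List Char), s.length ≤ n →
      pvScan [(a, b)] (pvScan ps s) = pvScan (ps ++ [(a, b)]) s := by
  intro n
  induction n with
  | zero =>
    intro s hs
    have : s = [] := List.eq_nil_of_length_eq_zero (Nat.le_zero.mp hs)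
    subst this; simp [pvScan_nil]
  | succ n ih =>
    intro s hs
    match s with
    | [] => simp [pvScan_nil]
    | c :: t =>
      cases hfind : List.find? (fun p => p.1.isPrefixOf (c :: t)) ps with
      | some pr =>
        obtain ⟨k, r⟩ := pr
        have hmem := List.mem_of_find?_eq_some hfind
        rw [pvScan_cons_some _ _ _ _ _ hfind]
        rw [pvSkip [(a, b)] r _ (by
          intro p hp i hi
          simp only [List.mem_singleton] at hp
          subst hp
          exact hskip (k, r) hmem i hi)]
        rw [ih _ (by simp only [List.length_drop]; simp only [List.length_cons] at hs; omega)]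
        rw [pvScan_cons_some (ps ++ [(a, b)]) c t k r (by rw [List.find?_append, hfind]; rfl)]
      | none =>
        by_cases hpre : a.isPrefixOf (c :: t) = true
        · obtain ⟨a0, a', rfl⟩ : ∃ a0 a', a = a0 :: a' := by
            cases a with
            | nil => exact absurd rfl ha
            | cons x xs => exact ⟨x, xs, rfl⟩
          obtain ⟨u, hu⟩ := List.isPrefixOf_iff_prefix.mp hpre
          rw [← hu] at hfind hs ⊢
          rw [pvSkip ps (a0 :: a') u (fun p hp i hi => hker p hp i hi)]
          have hulen : u.length ≤ n := by
            simp only [List.length_cons, List.length_append] at hs; omega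
          have hprefA : (a0 :: a').isPrefixOf (a0 :: (a' ++ pvScan ps u)) = true :=
            List.isPrefixOf_iff_prefix.mpr ⟨pvScan ps u, by simp⟩
          rw [List.cons_append, pvScan_cons_some [(a0 :: a', b)] a0 (a' ++ pvScan ps u)
                (a0 :: a') b (by simp [List.find?, hprefA])]
          rw [show ((a0 :: a').length - 1) = a'.length by simp, List.drop_left]
          rw [ih u hulen]
          have hprefA2 : (a0 :: a').isPrefixOf (a0 :: (a' ++ u)) = true :=
            List.isPrefixOf_iff_prefix.mpr ⟨u, by simp⟩
          rw [List.cons_append, pvScan_cons_some (ps ++ [(a0 :: a', b)]) a0 (a' ++ u)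
                (a0 :: a') b (by
                  rw [List.find?_append]
                  rw [show List.find? (fun p => p.1.isPrefixOf (a0 :: (a' ++ u))) ps = none from
                    by rw [← List.cons_append]; exact hfind]
                  simp [List.find?, hprefA2])]
          rw [show ((a0 :: a').length - 1) = a'.length by simp, List.drop_left]
        · have hpre' : a.isPrefixOf (c :: t) = false := Bool.not_eq_true _ |>.mp hpre
          rw [pvScan_cons_none _ _ _ hfind]
          have hfa : List.find? (fun p => p.1.isPrefixOf (c :: pvScan ps t)) [(a, b)] = none := by
            simp only [List.find?]
            have : a.isPrefixOf (c :: pvScan ps t) = false := by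
              by_contra hc
              rw [Bool.not_eq_false] at hc
              obtain ⟨a0, a', rfl⟩ : ∃ a0 a', a = a0 :: a' := by
                cases a with
                | nil => exact absurd rfl ha
                | cons x xs => exact ⟨x, xs, rfl⟩
              rw [List.isPrefixOf_iff_prefix, List.cons_prefix_cons] at hc
              obtain ⟨rfl, hc'⟩ := hc
              have := pvHeadBack ps hrep t.length t a' le_rfl
                (fun hm => haw (List.mem_cons_of_mem _ hm))
                (List.isPrefixOf_iff_prefix.mpr hc')
              rw [List.isPrefixOf_iff_prefix] at this
              have htrue : (a0 :: a').isPrefixOf (a0 :: t) = true :=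
                List.isPrefixOf_iff_prefix.mpr (List.cons_prefix_cons.mpr ⟨rfl, this⟩)
              rw [htrue] at hpre'
              simp at hpre' 
            simp [this]
          rw [pvScan_cons_none [(a, b)] c (pvScan ps t) hfa]
          rw [ih t (by simp only [List.length_cons] at hs; omega)]
          rw [pvScan_cons_none (ps ++ [(a, b)]) c t (by
            rw [List.find?_append, hfind]
            simp [List.find?, hpre'])]

theorem pvGo (old new : List Char) (hold : old ≠ []) :
    ∀ (fuel : Nat) (l acc : List Char), l.length ≤ fuel →
      PySem.Chars.replace.go old new fuel l acc = acc.reverse ++ pvScan [(old, new)] l := by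
  intro fuel
  induction fuel with
  | zero =>
    intro l acc hl
    have : l = [] := List.eq_nil_of_length_eq_zero (Nat.le_zero.mp hl)
    subst this
    simp [PySem.Chars.replace.go, pvScan_nil]
  | succ n ih =>
    intro l acc hl
    match l with
    | [] => simp [PySem.Chars.replace.go, pvScan_nil]
    | c :: t =>
      rw [PySem.Chars.replace.go]
      have hpos : 0 < old.length := List.length_pos_of_ne_nil hold
      by_cases hp : old.isPrefixOf (c :: t) = true
      · rw [if_pos hp]
        rw [ih _ _ (by simp only [List.length_drop, List.length_cons]
                       simp only [List.length_cons] at hl; omega)]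
        rw [pvScan_cons_some [(old, new)] c t old new (by simp [List.find?, hp])]
        have hdrop : List.drop old.length (c :: t) = List.drop (old.length - 1) t := by
          obtain ⟨m, hm⟩ := Nat.exists_eq_add_of_lt hpos
          simp [hm]
        rw [hdrop]
        simp
      · rw [if_neg hp]
        rw [ih t _ (by simp only [List.length_cons] at hl; omega)]
        rw [pvScan_cons_none [(old, new)] c t (by
          simp only [List.find?]
          simp [Bool.not_eq_true _ |>.mp hp])]
        simp

theorem pvRep (l old new : List Char) (hold : old ≠ []) :
    PySem.Chars.replace l old new = pvScan [(old, new)] l := by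
  rw [PySem.Chars.replace]
  rw [if_neg (by simp [hold])]
  simpa using pvGo old new hold l.length l [] le_rfl

-- ===== VERDICT (by name: the statement is the Claim_ definition above) =====
theorem backslash_escape_py_spec : Claim_equal_backslash_escape_py := by
  intro payload _
  unfold Spec_backslash_escape_py backslash_escape_py backslash_escape_py_alt
  apply String.toList_inj.mp
  simp only [List.foldl, PySem.Str.toList_replace, String.toList_ofList]
  rw [pvRep _ _ _ (by decide), pvRep _ _ _ (by decide), pvRep _ _ _ (by decide),
      pvRep _ _ _ (by decide)]
  rw [pvStage [("script".toList, "\\script".toList)] "alert".toList "\\alert".toList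
        (by decide) (by decide) (by decide) (by decide) (by decide) _ _ le_rfl]
  simp only [List.cons_append, List.nil_append]
  rw [pvStage [("script".toList, "\\script".toList), ("alert".toList, "\\alert".toList)]
        "img".toList "\\img".toList
        (by decide) (by decide) (by decide) (by decide) (by decide) _ _ le_rfl]
  simp only [List.cons_append, List.nil_append]
  rw [pvStage [("script".toList, "\\script".toList), ("alert".toList, "\\alert".toList),
        ("img".toList, "\\img".toList)] "svg".toList "\\svg".toList
        (by decide) (by decide) (by decide) (by decide) (by decide) _ _ le_rfl]
  simp only [List.cons_append, List.nil_append]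
  rfl
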